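-- pv_equiv track=rewrite | github.com/vadim-zyamalov/project-euler | Problems 001-050/p36.py | genPalyndrome2
-- ===== SOURCE A (Python) =====
-- def genPalyndrome2(num: int, odd=False) -> int:
--     res = num
--     if odd:
--         num >>= 1
--     while num:
--         res = (res << 1) + (num & 1)
--         num >>= 1
--     return res
-- ===== SOURCE B (Python) =====
-- def genPalyndrome2(num, odd=False):
--     m = num >> 1 if odd else num
--     mirror = bin(m)[2:][::-1] if m else ''
--     return int(bin(num)[2:] + mirror, 2)
-- ===== Notes on version B (the rewrite author's own statement) =====
-- stated objective: idiomatic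
-- what changed: B builds the palindrome on the binary STRING representation (bin, slice-reverse, concatenate, int(...,2)) instead of A's bit-by-bit shift-and-add loop over the integer.
import Mathlib
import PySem

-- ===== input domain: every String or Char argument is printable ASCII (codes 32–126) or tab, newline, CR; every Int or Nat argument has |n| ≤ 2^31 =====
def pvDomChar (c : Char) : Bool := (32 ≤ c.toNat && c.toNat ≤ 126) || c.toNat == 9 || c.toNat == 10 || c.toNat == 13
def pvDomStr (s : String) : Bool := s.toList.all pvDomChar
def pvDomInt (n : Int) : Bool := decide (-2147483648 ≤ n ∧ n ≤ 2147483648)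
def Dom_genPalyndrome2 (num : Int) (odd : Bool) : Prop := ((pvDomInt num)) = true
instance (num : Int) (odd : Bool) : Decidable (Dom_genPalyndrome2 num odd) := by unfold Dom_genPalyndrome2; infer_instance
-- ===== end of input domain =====

-- B mirrors the binary string representation with slicing instead of A's bit-by-bit shift loop (objective: idiomatic).


-- ===== PORT A =====
-- A's while loop; Python's `num >> 1` / `num & 1` are ported as Int shift / Int.land (exact two's-complement
-- semantics). The Python loop never terminates when num < 0 (excluded by Pre_), so the Lean loop stops on num ≤ 0.
def genPalyndrome2Loop (res num : Int) : Int :=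
  if num ≤ 0 then res
  else genPalyndrome2Loop ((res <<< (1 : Nat)) + Int.land num 1) (num >>> (1 : Nat))
termination_by num.toNat
decreasing_by
  have h2 : num >>> (1 : Nat) = num / 2 := by
    rw [Int.shiftRight_eq_div_pow]; norm_num
  omega

def genPalyndrome2 (num : Int) (odd : Bool) : Int :=
  let num' := if odd then num >>> (1 : Nat) else num
  genPalyndrome2Loop num num'

-- ===== PORT B =====
-- bin(n)[2:] for n ≥ 0, hand-ported (exact for nonnegative n): MSB-first binary digit characters
def natBits (n : Nat) : List Char :=
  if _h : n = 0 then []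
  else natBits (n / 2) ++ [if n % 2 = 1 then '1' else '0']
decreasing_by omega

def binStr (n : Int) : List Char :=
  if n = 0 then ['0'] else natBits n.toNat

-- int(s, 2) for a string of '0'/'1' characters, hand-ported (exact on that domain)
def parseBin (s : List Char) : Int :=
  s.foldl (fun acc c => 2 * acc + (if c = '1' then 1 else 0)) 0

def genPalyndrome2_alt (num : Int) (odd : Bool) : Int :=
  let m := if odd then num >>> (1 : Nat) else num
  let mirror := if m ≠ 0 then (binStr m).reverse else []
  parseBin (binStr num ++ mirror)

-- ===== PRECONDITION & SPEC =====
-- A's while loop never terminates when num < 0 (Python's >> keeps the sign), so Pre_ admits exactly the nonnegative inputs.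
def Pre_genPalyndrome2 (num : Int) (odd : Bool) : Prop := 0 ≤ num
instance (num : Int) (odd : Bool) : Decidable (Pre_genPalyndrome2 num odd) := by unfold Pre_genPalyndrome2; infer_instance
def pvWitness_genPalyndrome2 : Int × Bool := (6, true)

def Spec_genPalyndrome2 (num : Int) (odd : Bool) (out : Int) : Prop := out = genPalyndrome2_alt num odd
instance (num : Int) (odd : Bool) (out : Int) : Decidable (Spec_genPalyndrome2 num odd out) := by unfold Spec_genPalyndrome2; infer_instance

-- ===== CLAIM (what is proved, stated in full; the proofs are below) =====
def Claim_equal_genPalyndrome2 : Prop := ∀ (num : Int) (odd : Bool), Dom_genPalyndrome2 num odd → Pre_genPalyndrome2 num odd → Spec_genPalyndrome2 num odd (genPalyndrome2 num odd)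

-- ===== LEMMAS AND PROOFS =====

def binStep (acc : Int) (c : Char) : Int := 2 * acc + (if c = '1' then 1 else 0)

theorem parseBin_eq_foldl (s : List Char) : parseBin s = s.foldl binStep 0 := rfl

theorem foldl_natBits (n : Nat) : ∀ acc : Int,
    (natBits n).foldl binStep acc = acc * 2 ^ (natBits n).length + n := by
  induction n using Nat.strong_induction_on with
  | _ n ih =>
    intro acc
    rw [natBits]
    by_cases h : n = 0
    · simp [h]
    · simp only [h, dif_neg, not_false_iff, List.foldl_append, List.length_append]
      rw [ih (n / 2) (by omega)]
      have hmod : n % 2 = 1 ∨ n % 2 = 0 := by omega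
      rcases hmod with hm | hm <;>
        simp [binStep, hm, pow_succ] <;> nlinarith [Nat.div_add_mod n 2]

theorem foldl_binStr (n : Int) (hn : 0 ≤ n) : (binStr n).foldl binStep 0 = n := by
  rw [binStr]
  by_cases h : n = 0
  · simp [h, binStep]
  · simp only [h, if_neg, not_false_iff]
    rw [foldl_natBits]
    simp [Int.toNat_of_nonneg hn]

theorem shr_one (n : Int) : n >>> (1 : Nat) = n / 2 := by
  rw [Int.shiftRight_eq_div_pow]; norm_num

theorem land_one (k : Nat) : Int.land (k : Int) 1 = ((k % 2 : Nat) : Int) := by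
  have h : Int.land (k : Int) 1 = ((k &&& 1 : Nat) : Int) := rfl
  rw [h, Nat.and_one_is_mod]

theorem loop_eq_foldl (k : Nat) : ∀ res : Int,
    genPalyndrome2Loop res (k : Int) = (natBits k).reverse.foldl binStep res := by
  induction k using Nat.strong_induction_on with
  | _ k ih =>
    intro res
    rw [genPalyndrome2Loop]
    by_cases h : k = 0
    · simp [h, natBits]
    · have hk : ¬ ((k : Int) ≤ 0) := by omega
      simp only [hk, if_neg, not_false_iff]
      have h2 : (k : Int) >>> (1 : Nat) = ((k / 2 : Nat) : Int) := by
        rw [shr_one]; omega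
      have h1 : (res <<< (1 : Nat)) + Int.land (k : Int) 1
          = binStep res (if k % 2 = 1 then '1' else '0') := by
        rw [land_one, Int.shiftLeft_eq]
        have hmod : k % 2 = 1 ∨ k % 2 = 0 := by omega
        rcases hmod with hm | hm <;> simp [hm, binStep] <;> ring
      rw [h2, h1, ih (k / 2) (by omega)]
      conv_rhs => rw [natBits]
      simp [h]

theorem genPalyndrome2_eq (num : Int) (odd : Bool) (h : 0 ≤ num) :
    genPalyndrome2 num odd = genPalyndrome2_alt num odd := by
  unfold genPalyndrome2 genPalyndrome2_alt
  set m : Int := if odd then num >>> (1 : Nat) else num with hm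
  have hm0 : 0 ≤ m := by
    rw [hm]; cases odd
    · simpa using h
    · simp only [if_pos]; rw [shr_one]; omega
  have hmk : m = ((m.toNat : Nat) : Int) := by omega
  rw [parseBin_eq_foldl, List.foldl_append, foldl_binStr num h]
  by_cases hz : m = 0
  · simp only [hz, ne_eq, not_true_eq_false, if_false]
    show genPalyndrome2Loop num 0 = List.foldl binStep num []
    rw [genPalyndrome2Loop]; simp
  · simp only [ne_eq, hz, not_false_iff, if_true]
    show genPalyndrome2Loop num m = ((binStr m).reverse).foldl binStep num
    have hl := loop_eq_foldl m.toNat num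
    rw [← hmk] at hl
    rw [binStr, if_neg hz]
    exact hl

-- ===== VERDICT (by name: the statement is the Claim_ definition above) =====
theorem genPalyndrome2_spec : Claim_equal_genPalyndrome2 := by
  intro num odd _ hpre
  unfold Spec_genPalyndrome2
  exact genPalyndrome2_eq num odd hpre
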